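-- pv_equiv track=rewrite | github.com/ljbassa/FairWire_feature | fair_grid_eval.py | ordered_fieldnames
-- ===== SOURCE A (Python) =====
-- from typing import Dict, Iterable, List, Sequence
--
-- def ordered_fieldnames(rows: List[Dict]) -> List[str]:
--     preferred = [
--         "model_tag",
--         "model_path",
--         "seed",
--         "n_runs",
--         "n_success",
--         "seeds",
--         "sample_returncode",
--         "eval_returncode",
--         "lp/auc_mean",
--         "lp/sp_abs_gap_mean",
--         "fair_abs_gap_mean",
--         "value/fair_abs_gap_mean",
--         "value/linkpred_auc_mean",
--         "lp/score_sp_abs_gap_mean",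
--         "overlap/auc_mean",
--         "lp/auc_mean_seed_mean",
--         "lp/auc_mean_seed_std",
--         "lp/sp_abs_gap_mean_seed_mean",
--         "lp/sp_abs_gap_mean_seed_std",
--         "fair_abs_gap_mean_seed_mean",
--         "fair_abs_gap_mean_seed_std",
--         "value/fair_abs_gap_mean_seed_mean",
--         "value/fair_abs_gap_mean_seed_std",
--         "value/linkpred_auc_mean_seed_mean",
--         "value/linkpred_auc_mean_seed_std",
--         "lp/score_sp_abs_gap_mean_seed_mean",
--         "lp/score_sp_abs_gap_mean_seed_std",
--         "overlap/auc_mean_seed_mean",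
--         "overlap/auc_mean_seed_std",
--         "raw_log",
--         "sample_cmd",
--         "eval_cmd",
--         "pt_path",
--         "per_graph_csv",
--         "summary_csv",
--         "sample_error",
--         "eval_error",
--     ]
--     out: List[str] = []
--     seen = set()
--     for key in preferred:
--         if any(key in row for row in rows):
--             out.append(key)
--             seen.add(key)
--     for row in rows:
--         for key in row.keys():
--             if key not in seen:
--                 out.append(key)
--                 seen.add(key)
--     return out
-- ===== SOURCE B (Python) =====
-- from typing import Dict, List
--
-- def ordered_fieldnames(rows: List[Dict]) -> List[str]:
--     preferred = [
--         "model_tag",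
--         "model_path",
--         "seed",
--         "n_runs",
--         "n_success",
--         "seeds",
--         "sample_returncode",
--         "eval_returncode",
--         "lp/auc_mean",
--         "lp/sp_abs_gap_mean",
--         "fair_abs_gap_mean",
--         "value/fair_abs_gap_mean",
--         "value/linkpred_auc_mean",
--         "lp/score_sp_abs_gap_mean",
--         "overlap/auc_mean",
--         "lp/auc_mean_seed_mean",
--         "lp/auc_mean_seed_std",
--         "lp/sp_abs_gap_mean_seed_mean",
--         "lp/sp_abs_gap_mean_seed_std",
--         "fair_abs_gap_mean_seed_mean",
--         "fair_abs_gap_mean_seed_std",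
--         "value/fair_abs_gap_mean_seed_mean",
--         "value/fair_abs_gap_mean_seed_std",
--         "value/linkpred_auc_mean_seed_mean",
--         "value/linkpred_auc_mean_seed_std",
--         "lp/score_sp_abs_gap_mean_seed_mean",
--         "lp/score_sp_abs_gap_mean_seed_std",
--         "overlap/auc_mean_seed_mean",
--         "overlap/auc_mean_seed_std",
--         "raw_log",
--         "sample_cmd",
--         "eval_cmd",
--         "pt_path",
--         "per_graph_csv",
--         "summary_csv",
--         "sample_error",
--         "eval_error",
--     ]
--     pref_index = {k: i for i, k in enumerate(preferred)}
--     keys = list(dict.fromkeys(k for row in rows for k in row))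
--     rank = {k: i for i, k in enumerate(keys)}
--     big = len(preferred)
--     return sorted(keys, key=lambda k: pref_index.get(k, big + rank[k]))
-- ===== Notes on version B (the rewrite author's own statement) =====
-- stated objective: alternative
-- what changed: Replaces A's two partitioning scans (per-preferred-key scan over all rows, then a nested seen-set loop) by building index tables once, collecting all keys in one deduplicating pass, and producing the output with a single stable sort keyed by preferred-index-or-first-seen-rank.
import Mathlib
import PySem

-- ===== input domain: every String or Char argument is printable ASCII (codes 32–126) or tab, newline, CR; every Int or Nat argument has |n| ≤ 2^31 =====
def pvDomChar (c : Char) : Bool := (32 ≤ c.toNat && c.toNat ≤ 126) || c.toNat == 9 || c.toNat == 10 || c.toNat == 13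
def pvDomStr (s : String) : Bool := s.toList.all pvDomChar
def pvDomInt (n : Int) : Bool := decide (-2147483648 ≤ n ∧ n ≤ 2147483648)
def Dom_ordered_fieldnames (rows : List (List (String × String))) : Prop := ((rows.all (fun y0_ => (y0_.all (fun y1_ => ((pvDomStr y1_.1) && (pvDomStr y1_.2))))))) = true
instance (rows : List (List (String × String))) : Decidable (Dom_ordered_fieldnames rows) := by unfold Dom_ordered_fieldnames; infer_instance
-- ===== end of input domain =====

-- B replaces A's two partitioning scans by one key-collection pass plus a single stable sort
-- with an index-table key (objective: alternative decomposition, similar cost).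


-- the literal `preferred` list both Pythons contain verbatim
def preferredKeys : List String :=
  ["model_tag", "model_path", "seed", "n_runs", "n_success", "seeds",
   "sample_returncode", "eval_returncode", "lp/auc_mean", "lp/sp_abs_gap_mean",
   "fair_abs_gap_mean", "value/fair_abs_gap_mean", "value/linkpred_auc_mean",
   "lp/score_sp_abs_gap_mean", "overlap/auc_mean", "lp/auc_mean_seed_mean",
   "lp/auc_mean_seed_std", "lp/sp_abs_gap_mean_seed_mean", "lp/sp_abs_gap_mean_seed_std",
   "fair_abs_gap_mean_seed_mean", "fair_abs_gap_mean_seed_std",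
   "value/fair_abs_gap_mean_seed_mean", "value/fair_abs_gap_mean_seed_std",
   "value/linkpred_auc_mean_seed_mean", "value/linkpred_auc_mean_seed_std",
   "lp/score_sp_abs_gap_mean_seed_mean", "lp/score_sp_abs_gap_mean_seed_std",
   "overlap/auc_mean_seed_mean", "overlap/auc_mean_seed_std", "raw_log",
   "sample_cmd", "eval_cmd", "pt_path", "per_graph_csv", "summary_csv",
   "sample_error", "eval_error"]

-- ===== PORT A =====
-- two loops over an (out, seen) pair, exactly as in Source A ('key in row' tests the dict's keys)
def ordered_fieldnames (rows : List (List (String × String))) : List String :=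
  let s1 := preferredKeys.foldl
    (fun (acc : List String × PySem.Set String) key =>
      if rows.any (fun row => (row.map Prod.fst).contains key)
      then (acc.1 ++ [key], PySem.Set.add acc.2 key)
      else acc)
    ([], PySem.Set.empty)
  let s2 := rows.foldl
    (fun acc row =>
      (row.map Prod.fst).foldl
        (fun (acc : List String × PySem.Set String) key =>
          if !(PySem.Set.contains acc.2 key)
          then (acc.1 ++ [key], PySem.Set.add acc.2 key)
          else acc)
        acc)
    s1
  s2.1

-- ===== PORT B =====
-- helper mirroring Source B's '{k: i for i, k in enumerate(xs)}' (counter-carrying loop)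
def enumIndexDict (xs : List String) (i : Int) (d : PySem.Dict String Int) : PySem.Dict String Int :=
  match xs with
  | [] => d
  | x :: t => enumIndexDict t (i + 1) (d.insert x i)

-- Source B: index tables + one pass collecting keys + one stable sort.
-- 'rank[k]' is ported as 'getD rank k 0': the sort key is only ever applied to k ∈ keys,
-- where rank always contains k, so Python's KeyError is unreachable and the default unused.
def ordered_fieldnames_alt (rows : List (List (String × String))) : List String :=
  let prefIndex := enumIndexDict preferredKeys 0 PySem.Dict.empty
  let keys := PySem.List.dedup (rows.flatMap (fun row => row.map Prod.fst))
  let rank := enumIndexDict keys 0 PySem.Dict.empty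
  let big : Int := PySem.List.len preferredKeys
  PySem.List.sorted keys
    (fun k => PySem.Dict.getD prefIndex k (big + PySem.Dict.getD rank k 0)) false

-- ===== PRECONDITION & SPEC =====
def Spec_ordered_fieldnames (rows : List (List (String × String))) (out : List String) : Prop := out = ordered_fieldnames_alt rows
instance (rows : List (List (String × String))) (out : List String) : Decidable (Spec_ordered_fieldnames rows out) := by unfold Spec_ordered_fieldnames; infer_instance

-- ===== CLAIM (what is proved, stated in full; the proofs are below) =====
def Claim_equal_ordered_fieldnames : Prop := ∀ (rows : List (List (String × String))), Dom_ordered_fieldnames rows → Spec_ordered_fieldnames rows (ordered_fieldnames rows)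

-- ===== LEMMAS AND PROOFS =====

theorem preferredKeys_nodup : preferredKeys.Nodup := by decide

-- lookups in the enumeration dict
theorem enumIndexDict_get?_of_not_mem (xs : List String) (k : String) (hk : k ∉ xs)
    (i : Int) (d : PySem.Dict String Int) :
    (enumIndexDict xs i d).get? k = d.get? k := by
  induction xs generalizing i d with
  | nil => rfl
  | cons x t ih =>
    simp only [List.mem_cons, not_or] at hk
    rw [enumIndexDict, ih hk.2, PySem.Dict.get?_insert_of_ne d i hk.1]

theorem enumIndexDict_get?_getElem (xs : List String) (hnd : xs.Nodup)
    (j : Nat) (hj : j < xs.length) (i : Int) (d : PySem.Dict String Int) :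
    (enumIndexDict xs i d).get? xs[j] = some (i + j) := by
  induction xs generalizing i d j with
  | nil => simp at hj
  | cons x t ih =>
    rw [enumIndexDict]
    rcases j with _ | j
    · have hx : x ∉ t := (List.nodup_cons.mp hnd).1
      simpa using enumIndexDict_get?_of_not_mem t x hx (i + 1) (d.insert x i) ▸
        (by rw [enumIndexDict_get?_of_not_mem t x hx, PySem.Dict.get?_insert_self] :
          (enumIndexDict t (i + 1) (d.insert x i)).get? x = some i)
    · have h := ih (List.nodup_cons.mp hnd).2 j (by simpa using Nat.lt_of_succ_lt_succ hj) (i + 1) (d.insert x i)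
      simp only [List.getElem_cons_succ]
      rw [h]; congr 1; push_cast; ring

-- loop 1 of A: appending to out and adding to seen keep the two components equal
theorem loopA1 (xs : List String) (p : String → Bool) (a : List String)
    (hnd : xs.Nodup) (hdisj : ∀ x ∈ xs, x ∉ a) :
    xs.foldl (fun (acc : List String × PySem.Set String) key =>
        if p key then (acc.1 ++ [key], PySem.Set.add acc.2 key) else acc) (a, a)
      = (a ++ xs.filter p, a ++ xs.filter p) := by
  induction xs generalizing a with
  | nil => simp
  | cons x t ih =>
    rcases List.nodup_cons.mp hnd with ⟨hx, hnd'⟩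
    simp only [List.foldl_cons, List.filter_cons]
    by_cases hp : p x
    · rw [if_pos hp, if_pos hp, PySem.Set.add_of_not_mem (hdisj x List.mem_cons_self)]
      rw [ih (a ++ [x]) hnd' (fun y hy => by
        simp only [List.mem_append, List.mem_singleton, not_or]
        exact ⟨hdisj y (List.mem_cons_of_mem _ hy), fun h => hx (h ▸ hy)⟩)]
      simp [List.append_assoc]
    · rw [if_neg (by simpa using hp), if_neg (by simpa using hp)]
      exact ih a hnd' (fun y hy => hdisj y (List.mem_cons_of_mem _ hy))

-- inner loop 2 of A is Set.update on both components
theorem loopA2_inner (ks : List String) (s : List String) :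
    ks.foldl (fun (acc : List String × PySem.Set String) key =>
        if !(PySem.Set.contains acc.2 key)
        then (acc.1 ++ [key], PySem.Set.add acc.2 key) else acc) (s, s)
      = (PySem.Set.update s ks, PySem.Set.update s ks) := by
  induction ks generalizing s with
  | nil => rfl
  | cons k t ih =>
    simp only [List.foldl_cons, PySem.Set.update_cons]
    by_cases hk : k ∈ s
    · rw [if_neg (by simpa [PySem.Set.contains_iff] using hk), PySem.Set.add_of_mem hk]
      exact ih s
    · rw [if_pos (by simpa [PySem.Set.contains_iff] using hk), PySem.Set.add_of_not_mem hk,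
        ← PySem.Set.add_of_not_mem hk]
      exact ih _

theorem loopA2 (rows : List (List (String × String))) (s : List String) :
    rows.foldl (fun acc row =>
        (row.map Prod.fst).foldl (fun (acc : List String × PySem.Set String) key =>
          if !(PySem.Set.contains acc.2 key)
          then (acc.1 ++ [key], PySem.Set.add acc.2 key) else acc) acc) (s, s)
      = (PySem.Set.update s (rows.flatMap (fun row => row.map Prod.fst)),
         PySem.Set.update s (rows.flatMap (fun row => row.map Prod.fst))) := by
  induction rows generalizing s with
  | nil => rfl
  | cons r t ih =>
    simp only [List.foldl_cons, List.flatMap_cons, PySem.Set.update_append]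
    rw [loopA2_inner, ih]

-- proof-only abbreviations
def flatKeys (rows : List (List (String × String))) : List String :=
  rows.flatMap (fun row => row.map Prod.fst)

def presentPref (rows : List (List (String × String))) : List String :=
  preferredKeys.filter (fun key => rows.any (fun row => (row.map Prod.fst).contains key))

theorem any_contains_iff (rows : List (List (String × String))) (k : String) :
    (rows.any (fun row => (row.map Prod.fst).contains k)) = true ↔ k ∈ flatKeys rows := by
  simp [flatKeys, List.mem_flatMap]

-- A returns the present preferred keys, then the other keys in first-appearance order
theorem A_eq (rows : List (List (String × String))) :
    ordered_fieldnames rows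
      = presentPref rows
        ++ (PySem.Set.ofList (flatKeys rows)).filter (fun y => !(preferredKeys.contains y)) := by
  simp only [ordered_fieldnames]
  have h1 := loopA1 preferredKeys
    (fun key => rows.any (fun row => (row.map Prod.fst).contains key)) [] preferredKeys_nodup
    (by simp)
  simp only [List.nil_append] at h1
  have h1' : preferredKeys.foldl
      (fun (acc : List String × PySem.Set String) key =>
        if rows.any (fun row => (row.map Prod.fst).contains key)
        then (acc.1 ++ [key], PySem.Set.add acc.2 key) else acc) ([], [])
      = (presentPref rows, presentPref rows) := h1
  rw [show (PySem.Set.empty : PySem.Set String) = ([] : List String) from rfl, h1',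
    loopA2 rows (presentPref rows)]
  show PySem.Set.update (presentPref rows) (flatKeys rows) = _
  rw [PySem.Set.update_eq_append_filter]
  congr 1
  apply List.filter_congr
  intro y hy
  have hyf : y ∈ flatKeys rows := (PySem.Set.mem_ofList _ _).mp hy
  congr 1
  rw [Bool.eq_iff_iff, PySem.Set.contains_iff]
  have hyf' : ∃ r ∈ rows, ∃ v, (y, v) ∈ r := by
    simpa [flatKeys, List.mem_flatMap] using hyf
  simp [presentPref, List.mem_filter, hyf']

-- B's single stable sort produces the same list
theorem B_eq (rows : List (List (String × String))) :
    ordered_fieldnames_alt rows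
      = presentPref rows
        ++ (PySem.Set.ofList (flatKeys rows)).filter (fun y => !(preferredKeys.contains y)) := by
  have hflat : rows.flatMap (fun row => row.map Prod.fst) = flatKeys rows := rfl
  simp only [ordered_fieldnames_alt, PySem.List.dedup_eq_ofList, hflat]
  set K := PySem.Set.ofList (flatKeys rows) with hK
  set P := presentPref rows with hP
  set N := K.filter (fun y => !(preferredKeys.contains y)) with hN
  set f := fun k => PySem.Dict.getD (enumIndexDict preferredKeys 0 PySem.Dict.empty) k
      (PySem.List.len preferredKeys + PySem.Dict.getD (enumIndexDict K 0 PySem.Dict.empty) k 0) with hf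
  have hKnd : K.Nodup := PySem.Set.nodup_ofList _
  have hPnd : P.Nodup := preferredKeys_nodup.filter _
  have hmemP : ∀ a, a ∈ P ↔ (a ∈ preferredKeys ∧ a ∈ flatKeys rows) := by
    intro a
    rw [hP, presentPref, List.mem_filter, and_congr_right_iff]
    intro _
    exact any_contains_iff rows a
  have hperm : (P ++ N).Perm K := by
    have h1 : P.Perm (K.filter (fun y => preferredKeys.contains y)) := by
      rw [List.perm_ext_iff_of_nodup hPnd (hKnd.filter _)]
      intro a
      rw [hmemP a, List.mem_filter]
      simp only [hK, PySem.Set.mem_ofList, List.contains_iff_mem]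
      tauto
    exact (h1.append_right N).trans (List.filter_append_perm _ K)
  have hfp : ∀ (j : Nat) (hj : j < preferredKeys.length), f preferredKeys[j] = (j : Int) := by
    intro j hj
    simp only [hf]
    rw [PySem.Dict.getD_eq_get?_getD,
      enumIndexDict_get?_getElem preferredKeys preferredKeys_nodup j hj 0 _]
    simp
  have hfn : ∀ a, a ∉ preferredKeys →
      f a = PySem.List.len preferredKeys
            + PySem.Dict.getD (enumIndexDict K 0 PySem.Dict.empty) a 0 := by
    intro a ha
    simp only [hf]
    rw [PySem.Dict.getD_eq_get?_getD, enumIndexDict_get?_of_not_mem _ _ ha]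
    simp [PySem.Dict.get?_empty]
  have hrank : ∀ (i : Nat) (hi : i < K.length),
      PySem.Dict.getD (enumIndexDict K 0 PySem.Dict.empty) K[i] 0 = (i : Int) := by
    intro i hi
    rw [PySem.Dict.getD_eq_get?_getD, enumIndexDict_get?_getElem K hKnd i hi 0 _]
    simp
  have hpwP : P.Pairwise (fun a b => f a < f b) := by
    apply List.Pairwise.sublist List.filter_sublist
    rw [List.pairwise_iff_getElem]
    intro i j hi hj hij
    rw [hfp i hi, hfp j hj]
    exact_mod_cast hij
  have hpwN : N.Pairwise (fun a b => f a < f b) := by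
    have hKpw : K.Pairwise (fun a b =>
        PySem.Dict.getD (enumIndexDict K 0 PySem.Dict.empty) a 0
          < PySem.Dict.getD (enumIndexDict K 0 PySem.Dict.empty) b 0) := by
      rw [List.pairwise_iff_getElem]
      intro i j hi hj hij
      rw [hrank i hi, hrank j hj]
      exact_mod_cast hij
    have hsub : N.Sublist K := by rw [hN]; exact List.filter_sublist
    have hNg := hKpw.sublist hsub
    refine List.Pairwise.imp_of_mem ?_ hNg
    intro a b ha hb hab
    have haN : a ∉ preferredKeys := by
      have := (List.mem_filter.mp (hN ▸ ha)).2
      simpa [List.contains_iff_mem] using this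
    have hbN : b ∉ preferredKeys := by
      have := (List.mem_filter.mp (hN ▸ hb)).2
      simpa [List.contains_iff_mem] using this
    rw [hfn a haN, hfn b hbN]
    omega
  have hcross : ∀ a ∈ P, ∀ b ∈ N, f a < f b := by
    intro a ha b hb
    have haP : a ∈ preferredKeys := ((hmemP a).mp ha).1
    obtain ⟨j, hj, ha'⟩ := List.mem_iff_getElem.mp haP
    have hbK : b ∈ K := (List.mem_filter.mp (hN ▸ hb)).1
    have hbN : b ∉ preferredKeys := by
      have := (List.mem_filter.mp (hN ▸ hb)).2
      simpa [List.contains_iff_mem] using this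
    obtain ⟨i, hi, hb'⟩ := List.mem_iff_getElem.mp hbK
    rw [← ha', hfp j hj, hfn b hbN, ← hb', hrank i hi]
    have hlen : PySem.List.len preferredKeys = (preferredKeys.length : Int) := by
      simp [PySem.List.len_eq]
    rw [hlen]
    omega
  exact PySem.List.sorted_eq_of_perm_of_pairwise_lt K (P ++ N) f hperm
    ((List.pairwise_append).mpr ⟨hpwP, hpwN, hcross⟩)

-- ===== VERDICT (by name: the statement is the Claim_ definition above) =====
theorem ordered_fieldnames_spec : Claim_equal_ordered_fieldnames := by
  intro rows _
  show ordered_fieldnames rows = ordered_fieldnames_alt rows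
  rw [A_eq, B_eq]
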